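-- pv_equiv track=rewrite | github.com/edt-yxz-zzd/python3_src | script/some/abandon/to_uint.py | uint2radix
-- ===== SOURCE A (Python) =====
-- def uint2radix(L, base, n):
--     assert L >= 0
--     assert base >= 1
--     assert 0 <= n < base**L
--
--     if L == 0:
--         return []
--     if base == 1:
--         return [0] * L
--
--     ls = []
--     while n:
--         n, r = divmod(n, base)
--         ls.append(r)
--
--     assert len(ls) <= L
--     ls += [0] * (L - len(ls))
--
--     return ls
-- ===== SOURCE B (Python) =====
-- def uint2radix(L, base, n):
--     assert L >= 0
--     assert base >= 1
--     assert 0 <= n < base**L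
--     ls = []
--     pw = 1
--     for _ in range(L):
--         ls.append((n // pw) % base)
--         pw *= base
--     return ls
-- ===== Notes on version B (the rewrite author's own statement) =====
-- stated objective: simpler
-- what changed: Replaces the carry-threading divmod while-loop plus zero-padding and the base==1/L==0 special cases with one fixed-count loop that extracts each digit independently as (n // base**i) % base via an incremental power.
import Mathlib
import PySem

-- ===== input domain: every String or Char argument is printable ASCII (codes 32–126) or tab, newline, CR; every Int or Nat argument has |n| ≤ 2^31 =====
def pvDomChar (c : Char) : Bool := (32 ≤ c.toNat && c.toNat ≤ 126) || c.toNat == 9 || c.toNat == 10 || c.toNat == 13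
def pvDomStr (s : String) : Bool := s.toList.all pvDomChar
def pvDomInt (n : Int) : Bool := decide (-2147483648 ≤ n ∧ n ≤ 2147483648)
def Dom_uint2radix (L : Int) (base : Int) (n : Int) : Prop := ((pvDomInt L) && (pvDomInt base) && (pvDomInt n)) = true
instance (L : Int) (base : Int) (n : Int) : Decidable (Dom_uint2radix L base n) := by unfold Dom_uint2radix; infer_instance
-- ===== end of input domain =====

-- B replaces A's carry-threading divmod while-loop + zero padding + special cases by one
-- fixed-count loop extracting each digit independently as (n // base^i) % base (objective: simpler).

-- ===== PORT A =====
-- the 'while n:' loop of A; the guard '0 < n ∧ 2 ≤ base' only makes the same computation total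
-- (this branch of A runs only with base ≥ 2 and n ≥ 0, where the conditions agree with 'n ≠ 0')
def uint2radixLoop (base : Int) (n : Int) : List Int :=
  if _h : 0 < n ∧ 2 ≤ base then
    PySem.Int.mod n base :: uint2radixLoop base (PySem.Int.floordiv n base)
  else []
termination_by n.toNat
decreasing_by
  have h1 := _h.1; have h2 := _h.2
  have hlt : PySem.Int.floordiv n base < n := by
    rw [PySem.Int.floordiv_eq_ediv_of_pos (by omega)]
    apply Int.ediv_lt_of_lt_mul (by omega)
    nlinarith
  have hnn : 0 ≤ PySem.Int.floordiv n base := by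
    rw [PySem.Int.floordiv_eq_ediv_of_pos (by omega)]
    exact Int.ediv_nonneg (by omega) (by omega)
  omega

def uint2radix (L : Int) (base : Int) (n : Int) : List Int :=
  if L = 0 then []
  else if base = 1 then List.replicate L.toNat 0
  else
    let ls := uint2radixLoop base n
    ls ++ List.replicate ((L - (ls.length : Int)).toNat) 0

-- ===== PORT B =====
def uint2radix_alt (L : Int) (base : Int) (n : Int) : List Int :=
  ((List.range L.toNat).foldl
    (fun (st : List Int × Int) _ =>
      (st.1 ++ [PySem.Int.mod (PySem.Int.floordiv n st.2) base], st.2 * base))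
    ([], 1)).1

-- ===== PRECONDITION & SPEC =====
-- exactly the three asserts shared by A and B: inputs violating any of them raise AssertionError
def Pre_uint2radix (L : Int) (base : Int) (n : Int) : Prop :=
  0 ≤ L ∧ 1 ≤ base ∧ 0 ≤ n ∧ n < base ^ L.toNat
instance (L : Int) (base : Int) (n : Int) : Decidable (Pre_uint2radix L base n) := by
  unfold Pre_uint2radix; infer_instance

def pvWitness_uint2radix : Int × Int × Int := (3, 2, 5)

def Spec_uint2radix (L : Int) (base : Int) (n : Int) (out : List Int) : Prop := out = uint2radix_alt L base n
instance (L : Int) (base : Int) (n : Int) (out : List Int) : Decidable (Spec_uint2radix L base n out) := by unfold Spec_uint2radix; infer_instance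

-- ===== CLAIM (what is proved, stated in full; the proofs are below) =====
def Claim_equal_uint2radix : Prop := ∀ (L : Int) (base : Int) (n : Int), Dom_uint2radix L base n → Pre_uint2radix L base n → Spec_uint2radix L base n (uint2radix L base n)

-- ===== LEMMAS AND PROOFS =====

-- the per-position digit list both programs produce
def pvDigits (base : Int) (n : Int) (k : Nat) : List Int :=
  (List.range k).map (fun i => PySem.Int.mod (PySem.Int.floordiv n (base ^ i)) base)

lemma altB_foldl (base n : Int) (k : Nat) (acc : List Int) (pw : Int) :
    (List.range k).foldl
      (fun (st : List Int × Int) _ =>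
        (st.1 ++ [PySem.Int.mod (PySem.Int.floordiv n st.2) base], st.2 * base))
      (acc, pw)
    = (acc ++ (List.range k).map
        (fun i => PySem.Int.mod (PySem.Int.floordiv n (pw * base ^ i)) base),
       pw * base ^ k) := by
  induction k with
  | zero => simp
  | succ k ih =>
    rw [List.range_succ, List.foldl_append, ih, List.map_append]
    simp [pow_succ, mul_comm, mul_left_comm]

lemma altB (L base n : Int) :
    uint2radix_alt L base n = pvDigits base n L.toNat := by
  unfold uint2radix_alt pvDigits
  rw [altB_foldl]
  simp

lemma loop_spec (base : Int) (hb : 2 ≤ base) (k : Nat) :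
    ∀ n : Int, 0 ≤ n → n < base ^ k →
      (uint2radixLoop base n).length ≤ k ∧
      uint2radixLoop base n ++ List.replicate (k - (uint2radixLoop base n).length) 0
        = pvDigits base n k := by
  have e1 : ∀ (a b : Int), 0 < b → PySem.Int.floordiv a b = a / b :=
    fun a b h => PySem.Int.floordiv_eq_ediv_of_pos h
  induction k with
  | zero =>
    intro n h0 h1
    have h1' : n < 1 := by simpa using h1
    have : n = 0 := by omega
    subst this
    rw [uint2radixLoop]
    simp [pvDigits]
  | succ k ih =>
    intro n h0 h1
    rw [uint2radixLoop]
    by_cases hn : 0 < n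
    · rw [dif_pos ⟨hn, hb⟩]
      have hq0 : 0 ≤ PySem.Int.floordiv n base := by
        rw [e1 _ _ (by omega)]
        exact Int.ediv_nonneg (by omega) (by omega)
      have hq1 : PySem.Int.floordiv n base < base ^ k := by
        rw [e1 _ _ (by omega)]
        apply Int.ediv_lt_of_lt_mul (by omega)
        calc n < base ^ (k+1) := h1
          _ = base ^ k * base := by ring
      obtain ⟨hlen, heq⟩ := ih (PySem.Int.floordiv n base) hq0 hq1
      refine ⟨by simpa using hlen, ?_⟩
      have hfd : ∀ i : Nat, PySem.Int.floordiv (PySem.Int.floordiv n base) (base ^ i)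
          = PySem.Int.floordiv n (base ^ (i+1)) := by
        intro i
        rw [e1 _ _ (by positivity), e1 _ _ (by omega), e1 _ _ (by positivity),
            Int.ediv_ediv_of_nonneg (by omega)]
        congr 1
        ring
      have hcons : pvDigits base n (k+1)
          = PySem.Int.mod n base :: pvDigits base (PySem.Int.floordiv n base) k := by
        unfold pvDigits
        rw [List.range_succ_eq_map, List.map_cons, List.map_map]
        congr 1
        · rw [pow_zero, e1 _ _ one_pos, Int.ediv_one]
        · apply List.map_congr_left
          intro i _
          simp only [Function.comp]
          rw [hfd i]
      rw [hcons, ← heq]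
      simp only [List.cons_append, List.length_cons]
      have : k + 1 - ((uint2radixLoop base (PySem.Int.floordiv n base)).length + 1)
          = k - (uint2radixLoop base (PySem.Int.floordiv n base)).length := by omega
      rw [this]
    · have : n = 0 := by omega
      subst this
      rw [dif_neg (by simp)]
      refine ⟨by simp, ?_⟩
      simp only [List.nil_append, List.length_nil, Nat.sub_zero]
      unfold pvDigits
      symm
      rw [List.eq_replicate_iff]
      refine ⟨by simp, ?_⟩
      intro x hx
      simp only [List.mem_map] at hx
      obtain ⟨i, _, rfl⟩ := hx
      rw [e1 _ _ (by positivity), Int.zero_ediv]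
      simp [PySem.Int.mod]

-- ===== VERDICT (by name: the statement is the Claim_ definition above) =====
theorem uint2radix_spec : Claim_equal_uint2radix := by
  intro L base n _hdom hpre
  obtain ⟨hL, hb1, hn0, hnlt⟩ := hpre
  unfold Spec_uint2radix
  rw [altB]
  unfold uint2radix
  by_cases hL0 : L = 0
  · subst hL0
    simp [pvDigits]
  · rw [if_neg hL0]
    by_cases hb : base = 1
    · subst hb
      rw [if_pos rfl]
      symm
      unfold pvDigits
      rw [List.eq_replicate_iff]
      refine ⟨by simp, ?_⟩
      intro x hx
      simp only [List.mem_map] at hx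
      obtain ⟨i, _, rfl⟩ := hx
      simp [PySem.Int.mod]
    · rw [if_neg hb]
      have hb2 : 2 ≤ base := by omega
      obtain ⟨hlen, heq⟩ := loop_spec base hb2 L.toNat n hn0 hnlt
      have ht : (L - ((uint2radixLoop base n).length : Int)).toNat
          = L.toNat - (uint2radixLoop base n).length := by omega
      rw [← heq]
      simp only [ht]
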